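-- pv_equiv track=rewrite | github.com/eitanspi/polar-codes-mac | polar/_decoder_base.py | _butterfly_ops
-- ===== SOURCE A (Python) =====
-- def _butterfly_ops(x_int: int, half_k: int):
--     """
--     Apply polar butterfly to a bit-packed integer.
--
--     Given x_int encoding [x_0, x_1, ..., x_{2*half_k - 1}] MSB-first:
--         x_bar[m]    = x[2m] ^ x[2m+1]   (XOR pairs)
--         x_barbar[m] = x[2m+1]            (right halves)
--
--     Returns (x_bar_int, x_barbar_int) packed MSB-first.
--     """
--     k = 2 * half_k
--     x_bar = x_barbar = 0
--     for m in range(half_k):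
--         b_even = (x_int >> (k - 1 - 2 * m)) & 1
--         b_odd  = (x_int >> (k - 2 - 2 * m)) & 1
--         x_bar    = (x_bar    << 1) | (b_even ^ b_odd)
--         x_barbar = (x_barbar << 1) | b_odd
--     return x_bar, x_barbar
-- ===== SOURCE B (Python) =====
-- def _butterfly_ops(x_int: int, half_k: int):
--     """LSB-first rebuild: consume the masked value two bits at a time with divmod,
--     placing each result bit at its final position (no accumulator shifting)."""
--     if half_k <= 0:
--         return 0, 0
--     t = x_int % (1 << (2 * half_k))
--     x_bar = x_barbar = 0
--     for j in range(half_k):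
--         t, pair = divmod(t, 4)
--         b_even, b_odd = divmod(pair, 2)
--         x_bar += (b_even ^ b_odd) << j
--         x_barbar += b_odd << j
--     return x_bar, x_barbar
-- ===== Notes on version B (the rewrite author's own statement) =====
-- stated objective: alternative
-- what changed: B masks the input once and consumes it LSB-first two bits at a time with divmod, adding each result bit at its final place value, instead of A's MSB-first per-index shift extraction into left-shifted OR-accumulators.
import Mathlib
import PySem

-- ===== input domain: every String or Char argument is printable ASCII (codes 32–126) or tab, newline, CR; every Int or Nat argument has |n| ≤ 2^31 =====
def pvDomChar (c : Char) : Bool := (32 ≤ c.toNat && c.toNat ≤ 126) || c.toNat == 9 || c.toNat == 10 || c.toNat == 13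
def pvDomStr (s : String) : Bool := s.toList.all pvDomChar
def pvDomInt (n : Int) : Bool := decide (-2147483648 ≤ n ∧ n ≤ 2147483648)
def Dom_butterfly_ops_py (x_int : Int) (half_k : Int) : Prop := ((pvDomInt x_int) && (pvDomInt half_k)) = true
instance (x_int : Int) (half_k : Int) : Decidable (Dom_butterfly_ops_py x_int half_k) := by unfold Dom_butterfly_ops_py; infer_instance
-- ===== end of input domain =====

-- B rebuilds both outputs LSB-first, consuming the masked input two bits at a
-- time with divmod and adding each result bit at its final place value, instead
-- of A's MSB-first extraction by per-index shifts into left-shifted accumulators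
-- (objective: alternative decomposition, same cost).

-- ===== PORT A =====
-- literal port of _butterfly_ops; shift amounts are nonnegative for every m the
-- loop visits, so '.toNat' is exact
def butterfly_ops_py (x_int : Int) (half_k : Int) : List Int :=
  let k := 2 * half_k
  let r := (PySem.List.pyRange 0 half_k 1).foldl
    (fun (s : Int × Int) m =>
      let b_even := PySem.Int.band (x_int >>> (k - 1 - 2 * m).toNat) 1
      let b_odd  := PySem.Int.band (x_int >>> (k - 2 - 2 * m).toNat) 1
      (PySem.Int.bor (s.1 <<< (1 : Nat)) (PySem.Int.bxor b_even b_odd),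
       PySem.Int.bor (s.2 <<< (1 : Nat)) b_odd))
    (0, 0)
  [r.1, r.2]

-- ===== PORT B =====
def butterfly_ops_py_alt (x_int : Int) (half_k : Int) : List Int :=
  if half_k ≤ 0 then [0, 0] else
  -- Python's '1 << k' and 'b << j' are ported as '2 ^ k' and 'b * 2 ^ j' (the
  -- identical values; Lean's Int '<<<' is not a single arithmetic step)
  let t0 := PySem.Int.mod x_int ((2 : Int) ^ (2 * half_k).toNat)
  let r := (PySem.List.pyRange 0 half_k 1).foldl
    (fun (s : Int × Int × Int) j =>
      let t      := PySem.Int.floordiv s.1 4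
      let pair   := PySem.Int.mod s.1 4
      let b_even := PySem.Int.floordiv pair 2
      let b_odd  := PySem.Int.mod pair 2
      -- shift amounts j are the loop indices 0..half_k-1, nonnegative, so '.toNat' is exact
      (t,
       s.2.1 + PySem.Int.bxor b_even b_odd * 2 ^ j.toNat,
       s.2.2 + b_odd * 2 ^ j.toNat))
    (t0, 0, 0)
  [r.2.1, r.2.2]

-- ===== PRECONDITION & SPEC =====
def Spec_butterfly_ops_py (x_int : Int) (half_k : Int) (out : List Int) : Prop := out = butterfly_ops_py_alt x_int half_k
instance (x_int : Int) (half_k : Int) (out : List Int) : Decidable (Spec_butterfly_ops_py x_int half_k out) := by unfold Spec_butterfly_ops_py; infer_instance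

-- ===== CLAIM (what is proved, stated in full; the proofs are below) =====
def Claim_equal_butterfly_ops_py : Prop := ∀ (x_int : Int) (half_k : Int), Dom_butterfly_ops_py x_int half_k → Spec_butterfly_ops_py x_int half_k (butterfly_ops_py x_int half_k)

-- ===== LEMMAS AND PROOFS =====

-- bit s of x, as an Int in {0,1}
def pvBit (x : Int) (s : Nat) : Int := x / 2 ^ s % 2

theorem pvBit_mem (x : Int) (s : Nat) : pvBit x s = 0 ∨ pvBit x s = 1 := by
  unfold pvBit; omega

theorem shiftRight_band_one (x : Int) (s : Nat) :
    PySem.Int.band (x >>> s) 1 = pvBit x s := by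
  rw [PySem.Int.band_one, pvBit]
  simp [PySem.Int.mod, Int.fmod_eq_emod, Int.shiftRight_eq_div_pow]

theorem nat_two_mul_or_one (m : Nat) : 2 * m ||| 1 = 2 * m + 1 := by
  have h := Nat.lor_bit false m true 0
  simp [Nat.bit] at h
  simpa [two_mul] using h

-- (a << 1) | b = 2*a + b for a ≥ 0 and b a bit
theorem bor_shift_bit (a b : Int) (ha : 0 ≤ a) (hb : b = 0 ∨ b = 1) :
    PySem.Int.bor (a <<< (1 : Nat)) b = 2 * a + b := by
  have h2 : a <<< (1 : Nat) = 2 * a := by rw [Int.shiftLeft_eq]; ring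
  rcases hb with hb | hb
  · simp [hb, h2]
  · subst hb
    rw [h2, PySem.Int.bor_of_nonneg (by omega) (by omega)]
    have ht : (2 * a).toNat = 2 * a.toNat := by omega
    rw [ht]
    have h1 : (1 : Int).toNat = 1 := rfl
    rw [h1, nat_two_mul_or_one]
    omega

theorem bxor_bits_mem (a b : Int) (ha : a = 0 ∨ a = 1) (hb : b = 0 ∨ b = 1) :
    PySem.Int.bxor a b = 0 ∨ PySem.Int.bxor a b = 1 := by
  rcases ha with ha | ha <;> rcases hb with hb | hb <;> subst ha <;> subst hb <;> decide

-- A's per-iteration bits, named so the fold characterization can be instantiated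
def cA (x : Int) (n : Nat) (m : Nat) : Int :=
  PySem.Int.bxor (PySem.Int.band (x >>> (2 * (n : Int) - 1 - 2 * (0 + (m : Int))).toNat) 1)
    (PySem.Int.band (x >>> (2 * (n : Int) - 2 - 2 * (0 + (m : Int))).toNat) 1)

def dA (x : Int) (n : Nat) (m : Nat) : Int :=
  PySem.Int.band (x >>> (2 * (n : Int) - 2 - 2 * (0 + (m : Int))).toNat) 1

-- characterization of A's MSB-first accumulation loop
theorem foldl_msb (n : Nat) (c d : Nat → Int)
    (hc : ∀ m, c m = 0 ∨ c m = 1) (hd : ∀ m, d m = 0 ∨ d m = 1) :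
    (List.range n).foldl
      (fun (s : Int × Int) m =>
        (PySem.Int.bor (s.1 <<< (1 : Nat)) (c m),
         PySem.Int.bor (s.2 <<< (1 : Nat)) (d m))) (0, 0)
    = (∑ m ∈ Finset.range n, c m * 2 ^ (n - 1 - m),
       ∑ m ∈ Finset.range n, d m * 2 ^ (n - 1 - m)) := by
  induction n with
  | zero => simp
  | succ n ih =>
    have hterm : ∀ (c : Nat → Int), (∀ m, c m = 0 ∨ c m = 1) →
        0 ≤ ∑ m ∈ Finset.range n, c m * 2 ^ (n - 1 - m) := by
      intro c hc
      apply Finset.sum_nonneg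
      intro m _
      rcases hc m with h | h <;> simp [h]
    have hsum : ∀ (c : Nat → Int), (∀ m, c m = 0 ∨ c m = 1) →
        2 * (∑ m ∈ Finset.range n, c m * 2 ^ (n - 1 - m)) + c n
        = ∑ m ∈ Finset.range (n + 1), c m * 2 ^ (n - m) := by
      intro c _
      rw [Finset.sum_range_succ, Nat.sub_self, pow_zero, mul_one, Finset.mul_sum]
      congr 1
      apply Finset.sum_congr rfl
      intro m hm
      have hm' : m < n := Finset.mem_range.mp hm
      have he : n - m = (n - 1 - m) + 1 := by omega
      rw [he, pow_succ]
      ring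
    rw [List.range_succ, List.foldl_append, ih, List.foldl_cons, List.foldl_nil]
    dsimp only
    rw [bor_shift_bit _ _ (hterm c hc) (hc n), bor_shift_bit _ _ (hterm d hd) (hd n),
      hsum c hc, hsum d hd]
    simp

-- characterization of B's LSB-first loop
theorem foldl_lsb (t0 : Int) (n : Nat) :
    (List.range n).foldl
      (fun (s : Int × Int × Int) (j : Nat) =>
        (PySem.Int.floordiv s.1 4,
         s.2.1 + PySem.Int.bxor (PySem.Int.floordiv (PySem.Int.mod s.1 4) 2)
             (PySem.Int.mod (PySem.Int.mod s.1 4) 2) * 2 ^ (0 + (j : Int)).toNat,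
         s.2.2 + PySem.Int.mod (PySem.Int.mod s.1 4) 2 * 2 ^ (0 + (j : Int)).toNat)) (t0, 0, 0)
    = (t0 / 4 ^ n,
       ∑ j ∈ Finset.range n, PySem.Int.bxor (pvBit t0 (2 * j + 1)) (pvBit t0 (2 * j)) * 2 ^ j,
       ∑ j ∈ Finset.range n, pvBit t0 (2 * j) * 2 ^ j) := by
  induction n with
  | zero => simp
  | succ n ih =>
    rw [List.range_succ, List.foldl_append, ih, List.foldl_cons, List.foldl_nil]
    dsimp only
    have hdiv : ∀ a : Int, PySem.Int.floordiv a 4 = a / 4 := by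
      intro a; simp [PySem.Int.floordiv, Int.fdiv_eq_ediv]
    have hmod4 : ∀ a : Int, PySem.Int.mod a 4 = a % 4 := by
      intro a; simp [PySem.Int.mod, Int.fmod_eq_emod]
    have hdiv2 : ∀ a : Int, PySem.Int.floordiv a 2 = a / 2 := by
      intro a; simp [PySem.Int.floordiv, Int.fdiv_eq_ediv]
    have hmod2 : ∀ a : Int, PySem.Int.mod a 2 = a % 2 := by
      intro a; simp [PySem.Int.mod, Int.fmod_eq_emod]
    have ht : t0 / 4 ^ n / 4 = t0 / 4 ^ (n + 1) := by
      rw [Int.ediv_ediv_of_nonneg (by positivity), pow_succ]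
    have h4 : (4 : Int) ^ n = 2 ^ (2 * n) := by
      rw [pow_mul]; norm_num
    have heb : t0 / 4 ^ n % 4 / 2 = pvBit t0 (2 * n + 1) := by
      rw [pvBit, pow_succ, ← Int.ediv_ediv_of_nonneg (by positivity), ← h4]
      omega
    have hob : t0 / 4 ^ n % 4 % 2 = pvBit t0 (2 * n) := by
      rw [pvBit, ← h4]
      omega
    have hsh : ∀ a : Int, a * 2 ^ (0 + (n : Int)).toNat = a * 2 ^ n := by
      intro a
      congr 2
      omega
    rw [hdiv, hmod4, hdiv2, hmod2, ht, heb, hob, hsh, hsh,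
      Finset.sum_range_succ, Finset.sum_range_succ]

-- low bits of x % 2^K agree with those of x
theorem pvBit_emod_pow (x : Int) (K s : Nat) (hs : s < K) :
    pvBit (x % 2 ^ K) s = pvBit x s := by
  unfold pvBit
  have hK : (2 : Int) ^ K = 2 ^ s * 2 ^ (K - s) := by
    rw [← pow_add]; congr 1; omega
  have hm : x % (2 ^ s * 2 ^ (K - s))
      = x + (-(2 ^ (K - s) * (x / (2 ^ s * 2 ^ (K - s))))) * 2 ^ s := by
    rw [Int.emod_def]; ring
  rw [hK, hm, Int.add_mul_ediv_right _ _ (by positivity)]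
  have h2 : (2 : Int) ^ (K - s) = 2 ^ (K - s - 1) * 2 := by
    rw [mul_comm, ← pow_succ']; congr 1; omega
  rw [h2]
  have h3 : x / 2 ^ s + -(2 ^ (K - s - 1) * 2 * (x / (2 ^ s * (2 ^ (K - s - 1) * 2))))
      = x / 2 ^ s + (-(2 ^ (K - s - 1) * (x / (2 ^ s * (2 ^ (K - s - 1) * 2))))) * 2 := by
    ring
  rw [h3]
  generalize x / 2 ^ s = A
  generalize 2 ^ (K - s - 1) * (x / (2 ^ s * (2 ^ (K - s - 1) * 2))) = B
  omega

-- ===== VERDICT (by name: the statement is the Claim_ definition above) =====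
theorem butterfly_ops_py_spec : Claim_equal_butterfly_ops_py := by
  intro x half_k _
  unfold Spec_butterfly_ops_py butterfly_ops_py butterfly_ops_py_alt
  by_cases hle : half_k ≤ 0
  · simp [hle, PySem.List.pyRange_one_eq_nil hle]
  · have hpos : 0 < half_k := by omega
    simp only [if_neg hle]
    obtain ⟨n, hn⟩ : ∃ n : Nat, half_k = (n : Int) := ⟨half_k.toNat, by omega⟩
    subst hn
    rw [PySem.List.pyRange_one]
    simp only [sub_zero, Int.toNat_natCast, List.foldl_map]
    -- the masked value used by B
    have ht0 : PySem.Int.mod x ((2 : Int) ^ (2 * (n : Int)).toNat) = x % 2 ^ (2 * n) := by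
      have hKn : (2 * (n : Int)).toNat = 2 * n := by omega
      rw [hKn]
      simp [PySem.Int.mod, Int.fmod_eq_emod]
    set t0 : Int := x % 2 ^ (2 * n) with ht0def
    have hA := foldl_msb n (cA x n) (dA x n)
      (fun m => by
        unfold cA
        apply bxor_bits_mem <;> rw [shiftRight_band_one] <;> exact pvBit_mem x _)
      (fun m => by unfold dA; rw [shiftRight_band_one]; exact pvBit_mem x _)
    simp only [cA, dA] at hA
    rw [hA, ht0, foldl_lsb]
    have hbar : ∑ m ∈ Finset.range n,
          PySem.Int.bxor (PySem.Int.band (x >>> (2 * (n : Int) - 1 - 2 * (0 + (m : Int))).toNat) 1)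
            (PySem.Int.band (x >>> (2 * (n : Int) - 2 - 2 * (0 + (m : Int))).toNat) 1) * 2 ^ (n - 1 - m)
        = ∑ j ∈ Finset.range n,
          PySem.Int.bxor (pvBit t0 (2 * j + 1)) (pvBit t0 (2 * j)) * 2 ^ j := by
      rw [← Finset.sum_range_reflect]
      apply Finset.sum_congr rfl
      intro j hj
      have hj' : j < n := Finset.mem_range.mp hj
      rw [shiftRight_band_one, shiftRight_band_one, ht0def,
        pvBit_emod_pow x (2 * n) (2 * j + 1) (by omega),
        pvBit_emod_pow x (2 * n) (2 * j) (by omega)]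
      have e1 : (2 * (n : Int) - 1 - 2 * (0 + ((n - 1 - j : Nat) : Int))).toNat = 2 * j + 1 := by
        omega
      have e2 : (2 * (n : Int) - 2 - 2 * (0 + ((n - 1 - j : Nat) : Int))).toNat = 2 * j := by
        omega
      have e3 : n - 1 - (n - 1 - j) = j := by omega
      rw [e1, e2, e3]
    have hbb : ∑ m ∈ Finset.range n,
          PySem.Int.band (x >>> (2 * (n : Int) - 2 - 2 * (0 + (m : Int))).toNat) 1 * 2 ^ (n - 1 - m)
        = ∑ j ∈ Finset.range n, pvBit t0 (2 * j) * 2 ^ j := by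
      rw [← Finset.sum_range_reflect]
      apply Finset.sum_congr rfl
      intro j hj
      have hj' : j < n := Finset.mem_range.mp hj
      rw [shiftRight_band_one, ht0def, pvBit_emod_pow x (2 * n) (2 * j) (by omega)]
      have e2 : (2 * (n : Int) - 2 - 2 * (0 + ((n - 1 - j : Nat) : Int))).toNat = 2 * j := by
        omega
      have e3 : n - 1 - (n - 1 - j) = j := by omega
      rw [e2, e3]
    rw [hbar, hbb]
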